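-- pv_equiv track=rewrite | github.com/Louis-He/earthquake-warning-IEWS | mseedAnalysis_server.py | extractEarthquakeSeries
-- ===== SOURCE A (Python) =====
-- def extractEarthquakeSeries(boolSeq, shortestPeriod):
--     timeIdxSeries = []
--     isEarthquake = False
--     count = 0
--
--     for i in boolSeq:
--         if isEarthquake == False and i == True:
--             isEarthquake = True
--             timeIdxSeries.append([count, -1])
--         if isEarthquake == True and i == False:
--             isEarthquake = False
--             startIdx = timeIdxSeries[len(timeIdxSeries) - 1][0]
--             if(count - startIdx < shortestPeriod):
--                 del timeIdxSeries[len(timeIdxSeries) - 1]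
--             else:
--                 timeIdxSeries[len(timeIdxSeries) - 1][1] = count
--         count += 1
--
--     return timeIdxSeries
-- ===== SOURCE B (Python) =====
-- def extractEarthquakeSeries(boolSeq, shortestPeriod):
--     # Edge detection: compare the sequence with its one-step shift (zip with padding),
--     # collect rising-edge and falling-edge index lists, and pair them positionally.
--     n = len(boolSeq)
--     pairs = list(zip([False] + list(boolSeq), list(boolSeq) + [False]))
--     rises = [i for i, pc in enumerate(pairs) if pc[1] and not pc[0]]
--     falls = [i for i, pc in enumerate(pairs) if pc[0] and not pc[1]]
--     out = []
--     for s, e in zip(rises, falls):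
--         if e == n:
--             out.append([s, -1])        # run still open at the end of the sequence
--         elif e - s >= shortestPeriod:
--             out.append([s, e])
--     return out
-- ===== Notes on version B (the rewrite author's own statement) =====
-- stated objective: alternative
-- what changed: Replaces A's single-pass append-then-delete state machine with edge detection: zip the sequence against its one-step shift to list rising-edge and falling-edge indices, pair them positionally with zip, and emit each pair (open pair when the fall index equals len, length-filtered otherwise).
import Mathlib
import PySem

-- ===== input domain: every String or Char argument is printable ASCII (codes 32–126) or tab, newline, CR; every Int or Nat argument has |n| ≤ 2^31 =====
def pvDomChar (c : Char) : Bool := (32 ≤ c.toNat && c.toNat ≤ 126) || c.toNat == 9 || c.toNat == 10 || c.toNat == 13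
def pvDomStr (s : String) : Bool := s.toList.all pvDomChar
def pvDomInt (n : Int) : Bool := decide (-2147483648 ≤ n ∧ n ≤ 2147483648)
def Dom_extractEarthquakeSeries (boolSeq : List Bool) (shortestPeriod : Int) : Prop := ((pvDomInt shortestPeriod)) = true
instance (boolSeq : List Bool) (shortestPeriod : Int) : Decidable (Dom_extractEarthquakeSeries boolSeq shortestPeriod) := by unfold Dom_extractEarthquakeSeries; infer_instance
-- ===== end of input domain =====

-- B replaces A's append-then-delete in-place state machine by edge detection: zip the
-- sequence with its one-step shift, list rising/falling edge indices, pair them with zip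
-- (objective: alternative algorithm, same cost).

-- ===== PORT A =====
-- loop body of A: state = (timeIdxSeries, isEarthquake, count)
def eqsStepA (shortestPeriod : Int) (st : List (List Int) × Bool × Int) (i : Bool) :
    List (List Int) × Bool × Int :=
  let ts := st.1
  let isE := st.2.1
  let count := st.2.2
  -- if isEarthquake == False and i == True:
  let st1 : List (List Int) × Bool :=
    if isE = false ∧ i = true then (ts ++ [[count, -1]], true) else (ts, isE)
  -- if isEarthquake == True and i == False:
  let st2 : List (List Int) × Bool :=
    if st1.2 = true ∧ i = false then
      -- timeIdxSeries[len-1][0]: the list is nonempty and its last entry has head startIdx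
      let startIdx := ((st1.1.getLast?).getD []).headD 0
      if count - startIdx < shortestPeriod then
        (st1.1.dropLast, false)                      -- del timeIdxSeries[-1]
      else
        (st1.1.dropLast ++ [[startIdx, count]], false) -- timeIdxSeries[-1][1] = count
    else st1
  (st2.1, st2.2, count + 1)

def extractEarthquakeSeries (boolSeq : List Bool) (shortestPeriod : Int) : List (List Int) :=
  (boolSeq.foldl (eqsStepA shortestPeriod) ([], false, 0)).1

-- ===== PORT B =====
def extractEarthquakeSeries_alt (boolSeq : List Bool) (shortestPeriod : Int) : List (List Int) :=
  let n : Int := boolSeq.length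
  let pairs := List.zip (false :: boolSeq) (boolSeq ++ [false])
  let rises := ((PySem.List.enumerate pairs).filter (fun ip => ip.2.2 && !ip.2.1)).map (·.1)
  let falls := ((PySem.List.enumerate pairs).filter (fun ip => ip.2.1 && !ip.2.2)).map (·.1)
  (List.zip rises falls).foldl (fun out se =>
    if se.2 = n then out ++ [[se.1, -1]]
    else if shortestPeriod ≤ se.2 - se.1 then out ++ [[se.1, se.2]]
    else out) []

-- ===== PRECONDITION & SPEC =====
def Spec_extractEarthquakeSeries (boolSeq : List Bool) (shortestPeriod : Int) (out : List (List Int)) : Prop := out = extractEarthquakeSeries_alt boolSeq shortestPeriod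
instance (boolSeq : List Bool) (shortestPeriod : Int) (out : List (List Int)) : Decidable (Spec_extractEarthquakeSeries boolSeq shortestPeriod out) := by unfold Spec_extractEarthquakeSeries; infer_instance

-- ===== CLAIM (what is proved, stated in full; the proofs are below) =====
def Claim_equal_extractEarthquakeSeries : Prop := ∀ (boolSeq : List Bool) (shortestPeriod : Int), Dom_extractEarthquakeSeries boolSeq shortestPeriod → Spec_extractEarthquakeSeries boolSeq shortestPeriod (extractEarthquakeSeries boolSeq shortestPeriod)

-- ===== LEMMAS AND PROOFS =====

-- Reference run machine: state = (closed runs, start of the open run)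
def eqsStepR (st : List (Int × Int) × Option Int) (p : Int × Bool) :
    List (Int × Int) × Option Int :=
  if p.2 = true ∧ st.2 = none then (st.1, some p.1)
  else if p.2 = false ∧ st.2 ≠ none then (st.1 ++ [(st.2.getD 0, p.1)], none)
  else st

-- finalisation of the reference state the way A filters
def eqsFin (sp : Int) (runs : List (Int × Int)) (start : Option Int) : List (List Int) :=
  (runs.filter (fun r => decide (sp ≤ r.2 - r.1))).map (fun r => [r.1, r.2]) ++
    (match start with | some s => [[s, -1]] | none => [])

-- A's fold equals the finalised reference machine
lemma eqs_main (sp : Int) :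
    ∀ (l : List Bool) (runs : List (Int × Int)) (start : Option Int) (count : Int),
    (l.foldl (eqsStepA sp) (eqsFin sp runs start, start.isSome, count)).1 =
      (let st := (PySem.List.enumerate l count).foldl eqsStepR (runs, start)
       eqsFin sp st.1 st.2) := by
  intro l
  induction l with
  | nil => intro runs start count; simp [PySem.List.enumerate]
  | cons i l ih =>
    intro runs start count
    rw [PySem.List.enumerate_cons]
    cases i with
    | true =>
      cases start with
      | none =>
        have h1 : eqsStepA sp (eqsFin sp runs none, false, count) true =
            (eqsFin sp runs (some count), true, count + 1) := by
          simp [eqsStepA, eqsFin]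
        have h2 : eqsStepR (runs, none) (count, true) = (runs, some count) := by
          simp [eqsStepR]
        simpa [h1, h2] using ih runs (some count) (count + 1)
      | some s =>
        have h1 : eqsStepA sp (eqsFin sp runs (some s), true, count) true =
            (eqsFin sp runs (some s), true, count + 1) := by
          simp [eqsStepA]
        have h2 : eqsStepR (runs, some s) (count, true) = (runs, some s) := by
          simp [eqsStepR]
        simpa [h1, h2] using ih runs (some s) (count + 1)
    | false =>
      cases start with
      | none =>
        have h2 : eqsStepR (runs, none) (count, false) = (runs, none) := by
          simp [eqsStepR]
        simpa [eqsStepA] using ih runs none (count + 1)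
      | some s =>
        have hlast : (eqsFin sp runs (some s)).getLast? = some [s, -1] := by
          simp [eqsFin]
        have hdrop : (eqsFin sp runs (some s)).dropLast =
            (runs.filter (fun r => decide (sp ≤ r.2 - r.1))).map (fun r => [r.1, r.2]) := by
          simp [eqsFin]
        have h2 : eqsStepR (runs, some s) (count, false) = (runs ++ [(s, count)], none) := by
          simp [eqsStepR]
        have h1 : eqsStepA sp (eqsFin sp runs (some s), true, count) false =
            (eqsFin sp (runs ++ [(s, count)]) none, false, count + 1) := by
          by_cases h : count - s < sp
          · simp [eqsStepA, h, eqsFin, List.filter_append,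
              show ¬ sp ≤ count - s by omega]
          · simp [eqsStepA, h, eqsFin, List.filter_append,
              show sp ≤ count - s by omega]
        simpa [h1, h2] using ih (runs ++ [(s, count)]) none (count + 1)

-- recursive forms of B's edge-index comprehensions
def risesRec : List Bool → Bool → Int → List Int
  | [], _, _ => []
  | b :: t, p, c => (if b && !p then [c] else []) ++ risesRec t b (c + 1)

def fallsRec : List Bool → Bool → Int → List Int
  | [], p, c => if p then [c] else []
  | b :: t, p, c => (if p && !b then [c] else []) ++ fallsRec t b (c + 1)

lemma rises_bridge : ∀ (l : List Bool) (p : Bool) (c : Int),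
    ((PySem.List.enumerate (List.zip (p :: l) (l ++ [false])) c).filter
        (fun ip => ip.2.2 && !ip.2.1)).map (·.1) = risesRec l p c := by
  intro l
  induction l with
  | nil => intro p c; cases p <;> simp [PySem.List.enumerate, risesRec]
  | cons b t ih =>
    intro p c
    have hz : List.zip (p :: b :: t) ((b :: t) ++ [false]) =
        (p, b) :: List.zip (b :: t) (t ++ [false]) := by simp
    rw [hz, PySem.List.enumerate_cons]
    cases b <;> cases p <;> simp [risesRec, ih]

lemma falls_bridge : ∀ (l : List Bool) (p : Bool) (c : Int),
    ((PySem.List.enumerate (List.zip (p :: l) (l ++ [false])) c).filter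
        (fun ip => ip.2.1 && !ip.2.2)).map (·.1) = fallsRec l p c := by
  intro l
  induction l with
  | nil => intro p c; cases p <;> simp [PySem.List.enumerate, fallsRec]
  | cons b t ih =>
    intro p c
    have hz : List.zip (p :: b :: t) ((b :: t) ++ [false]) =
        (p, b) :: List.zip (b :: t) (t ++ [false]) := by simp
    rw [hz, PySem.List.enumerate_cons]
    cases b <;> cases p <;> simp [fallsRec, ih]

def optStart : Option Int → List Int
  | some s => [s]
  | none => []

-- the positional pairing of edges equals the reference machine's runs (open run closed at c+len)
lemma zip_edges : ∀ (l : List Bool) (runs : List (Int × Int)) (start : Option Int) (c : Int),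
    runs ++ List.zip (optStart start ++ risesRec l start.isSome c) (fallsRec l start.isSome c)
      = (let st := (PySem.List.enumerate l c).foldl eqsStepR (runs, start)
         st.1 ++ (match st.2 with | some s => [(s, c + (l.length : Int))] | none => [])) := by
  intro l
  induction l with
  | nil =>
    intro runs start c
    cases start <;> simp [PySem.List.enumerate, risesRec, fallsRec, optStart]
  | cons b t ih =>
    intro runs start c
    rw [PySem.List.enumerate_cons]
    have hlen : c + ((b :: t).length : Int) = (c + 1) + (t.length : Int) := by
      simp; omega
    cases b with
    | true =>
      cases start with
      | none =>
        have h2 : eqsStepR (runs, none) (c, true) = (runs, some c) := by simp [eqsStepR]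
        have := ih runs (some c) (c + 1)
        simp only [List.foldl_cons, h2]
        rw [hlen]
        simpa [risesRec, fallsRec, optStart] using this
      | some s =>
        have h2 : eqsStepR (runs, some s) (c, true) = (runs, some s) := by simp [eqsStepR]
        have := ih runs (some s) (c + 1)
        simp only [List.foldl_cons, h2]
        rw [hlen]
        simpa [risesRec, fallsRec, optStart] using this
    | false =>
      cases start with
      | none =>
        have h2 : eqsStepR (runs, none) (c, false) = (runs, none) := by simp [eqsStepR]
        have := ih runs none (c + 1)
        simp only [List.foldl_cons, h2]
        rw [hlen]
        simpa [risesRec, fallsRec, optStart] using this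
      | some s =>
        have h2 : eqsStepR (runs, some s) (c, false) = (runs ++ [(s, c)], none) := by
          simp [eqsStepR]
        have := ih (runs ++ [(s, c)]) none (c + 1)
        simp only [List.foldl_cons, h2]
        rw [hlen]
        simpa [risesRec, fallsRec, optStart] using this

-- every closed run produced over enumerate l c ends before c + len l
lemma ends_lt : ∀ (l : List Bool) (runs : List (Int × Int)) (start : Option Int) (c : Int),
    ∀ pr ∈ ((PySem.List.enumerate l c).foldl eqsStepR (runs, start)).1,
      pr ∈ runs ∨ pr.2 < c + (l.length : Int) := by
  intro l
  induction l with
  | nil => intro runs start c pr h; simp [PySem.List.enumerate] at h; exact Or.inl h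
  | cons b t ih =>
    intro runs start c pr h
    rw [PySem.List.enumerate_cons] at h
    have hlen : (c + 1) + (t.length : Int) = c + ((b :: t).length : Int) := by simp; omega
    cases b with
    | true =>
      cases start with
      | none =>
        rcases ih runs (some c) (c + 1) pr (by simpa [eqsStepR] using h) with h' | h'
        · exact Or.inl h'
        · exact Or.inr (by omega)
      | some s =>
        rcases ih runs (some s) (c + 1) pr (by simpa [eqsStepR] using h) with h' | h'
        · exact Or.inl h'
        · exact Or.inr (by omega)
    | false =>
      cases start with
      | none =>
        rcases ih runs none (c + 1) pr (by simpa [eqsStepR] using h) with h' | h'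
        · exact Or.inl h'
        · exact Or.inr (by omega)
      | some s =>
        rcases ih (runs ++ [(s, c)]) none (c + 1) pr (by simpa [eqsStepR] using h) with h' | h'
        · rcases List.mem_append.1 h' with h'' | h''
          · exact Or.inl h''
          · simp at h''; subst h''; right; simp
        · exact Or.inr (by omega)

-- flatMap respects pointwise equality on members
lemma flatMap_congr_mem {α β : Type} (l : List α) (f g : α → List β)
    (h : ∀ x ∈ l, f x = g x) : l.flatMap f = l.flatMap g := by
  induction l with
  | nil => simp
  | cons x t ih =>
    simp only [List.flatMap_cons, h x (by simp)]
    rw [ih (fun y hy => h y (by simp [hy]))]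

-- flatMap of an if-singleton is map-of-filter
lemma flatMap_if_singleton {α β : Type} (p : α → Bool) (g : α → β) :
    ∀ (l : List α), (l.flatMap (fun x => if p x then [g x] else [])) =
      (l.filter p).map g := by
  intro l
  induction l with
  | nil => simp
  | cons x t ih => by_cases h : p x <;> simp [h, ih]

-- ===== VERDICT (by name: the statement is the Claim_ definition above) =====
theorem extractEarthquakeSeries_spec : Claim_equal_extractEarthquakeSeries := by
  intro l sp _
  show extractEarthquakeSeries l sp = extractEarthquakeSeries_alt l sp
  have hA := eqs_main sp l [] none 0
  set st := (PySem.List.enumerate l 0).foldl eqsStepR ([], none) with hst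
  have hA' : extractEarthquakeSeries l sp = eqsFin sp st.1 st.2 := by
    simpa [extractEarthquakeSeries, eqsFin] using hA
  -- B side
  have hz := zip_edges l [] none 0
  simp only [optStart, Option.isSome, List.nil_append, zero_add] at hz
  have hB : extractEarthquakeSeries_alt l sp =
      (List.zip (risesRec l false 0) (fallsRec l false 0)).foldl (fun out se =>
        if se.2 = (l.length : Int) then out ++ [[se.1, -1]]
        else if sp ≤ se.2 - se.1 then out ++ [[se.1, se.2]]
        else out) [] := by
    simp only [extractEarthquakeSeries_alt, rises_bridge, falls_bridge]
  rw [hB, hz]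
  have hfun : (fun (out : List (List Int)) (se : Int × Int) =>
      if se.2 = (l.length : Int) then out ++ [[se.1, -1]]
      else if sp ≤ se.2 - se.1 then out ++ [[se.1, se.2]] else out) =
      (fun out se => out ++ (if se.2 = (l.length : Int) then [[se.1, -1]]
        else if sp ≤ se.2 - se.1 then [[se.1, se.2]] else [])) := by
    funext out se
    by_cases h1 : se.2 = (l.length : Int)
    · simp [h1]
    · by_cases h2 : sp ≤ se.2 - se.1 <;> simp [h1, h2]
  rw [hfun, PySem.List.foldl_append_eq_flatMap]
  rw [List.flatMap_append]
  have hclosed : (st.1.flatMap (fun se => if se.2 = (l.length : Int) then [[se.1, -1]]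
        else if sp ≤ se.2 - se.1 then [[se.1, se.2]] else [])) =
        (st.1.filter (fun r => decide (sp ≤ r.2 - r.1))).map (fun r => [r.1, r.2]) := by
    rw [← flatMap_if_singleton (fun r : Int × Int => decide (sp ≤ r.2 - r.1))
      (fun r : Int × Int => [r.1, r.2])]
    apply flatMap_congr_mem
    intro pr hpr
    rcases ends_lt l [] none 0 pr hpr with h | h
    · simp at h
    · have hne : pr.2 ≠ (l.length : Int) := by omega
      simp [hne]
  cases hs2 : st.2 with
  | none => simp [hA', eqsFin, hclosed, hs2, ← hst]
  | some s => simp [hA', eqsFin, hclosed, hs2, ← hst]
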